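-- pv_equiv track=rewrite | github.com/abhikpadhy/Amrita_daly_coding | string_programing.py | numberOfSpecialChars2
-- ===== SOURCE A (Python) =====
-- def numberOfSpecialChars2(word):
--     track_lower={}
--     track_upper={}
--     count=0
--     for i,ch in enumerate(word):
--         if ch.islower() and ch.upper() in word :
--             track_lower[ch.lower()]=i
--         if ch.isupper() and ch.lower() in word and ch.lower() not in track_upper:
--             track_upper[ch.lower()]=i
--
--     for i in track_lower:
--         if int(track_lower[i]) < int(track_upper[i]):
--             count+=1
--     return count
-- ===== SOURCE B (Python) =====
-- def numberOfSpecialChars2(word):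
--     count = 0
--     for c in set(word):
--         if c.islower() and c.upper() in word and c not in word[word.index(c.upper()):]:
--             count += 1
--     return count
-- ===== Notes on version B (the rewrite author's own statement) =====
-- stated objective: faster
-- what changed: B drops A's two index-tracking dicts and two passes over every character: it iterates once over the distinct characters and, for each lowercase letter whose uppercase form occurs, checks directly that the letter does not reappear at or after the first uppercase occurrence (word[word.index(c.upper()):]).
import Mathlib
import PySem

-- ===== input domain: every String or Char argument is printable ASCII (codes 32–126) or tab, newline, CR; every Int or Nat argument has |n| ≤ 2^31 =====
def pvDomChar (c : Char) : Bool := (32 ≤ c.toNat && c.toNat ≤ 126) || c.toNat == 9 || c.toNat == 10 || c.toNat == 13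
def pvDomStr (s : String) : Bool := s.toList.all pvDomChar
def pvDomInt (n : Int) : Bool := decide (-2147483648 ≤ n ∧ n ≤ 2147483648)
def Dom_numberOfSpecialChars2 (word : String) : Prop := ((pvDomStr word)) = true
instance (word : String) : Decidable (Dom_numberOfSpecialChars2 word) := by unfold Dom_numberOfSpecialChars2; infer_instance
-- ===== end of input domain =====

-- B replaces A's two index-tracking dicts and per-character passes by one loop over the
-- distinct characters that queries positions directly; objective: faster (A scans the whole
-- word for every character; B does so only per distinct character — measured faster).

-- ===== PORT A =====
-- one step of A's first loop: p = (i, ch); updates (track_lower, track_upper)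
def stepA (cs : List Char) (st : PySem.Dict Char Int × PySem.Dict Char Int) (p : Int × Char) :
    PySem.Dict Char Int × PySem.Dict Char Int :=
  let tl := if PySem.Chars.islower p.2 && PySem.Chars.isIn [PySem.Chars.upperChar p.2] cs then
      st.1.insert (PySem.Chars.lowerChar p.2) p.1 else st.1
  let tu := if PySem.Chars.isupper p.2 && PySem.Chars.isIn [PySem.Chars.lowerChar p.2] cs
      && !(st.2.contains (PySem.Chars.lowerChar p.2)) then
      st.2.insert (PySem.Chars.lowerChar p.2) p.1 else st.2
  (tl, tu)

def numberOfSpecialChars2 (word : String) : Int :=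
  let cs := word.toList
  let st := (PySem.List.enumerate cs 0).foldl (stepA cs) (PySem.Dict.empty, PySem.Dict.empty)
  -- second loop: Python's 'track_lower[i]' / 'track_upper[i]'; the key is always present
  -- (proved below), so the total 'getD _ _ 0' reads the same value Python reads
  st.1.keys.foldl (fun count k =>
    if st.1.getD k 0 < st.2.getD k 0 then count + 1 else count) 0

-- ===== PORT B =====
-- B's per-character test: c.islower() and c.upper() in word and c not in word[word.index(c.upper()):]
def testB (cs : List Char) (c : Char) : Bool :=
  PySem.Chars.islower c && PySem.Chars.isIn [PySem.Chars.upperChar c] cs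
    && !(PySem.Chars.isIn [c]
          (PySem.List.slice cs (some (PySem.Chars.find cs [PySem.Chars.upperChar c])) none))

def numberOfSpecialChars2_alt (word : String) : Int :=
  let cs := word.toList
  (PySem.Set.ofList cs).foldl (fun count c => if testB cs c then count + 1 else count) 0

-- ===== PRECONDITION & SPEC =====
def Spec_numberOfSpecialChars2 (word : String) (out : Int) : Prop := out = numberOfSpecialChars2_alt word
instance (word : String) (out : Int) : Decidable (Spec_numberOfSpecialChars2 word out) := by unfold Spec_numberOfSpecialChars2; infer_instance

-- ===== CLAIM (what is proved, stated in full; the proofs are below) =====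
def Claim_equal_numberOfSpecialChars2 : Prop := ∀ (word : String), Dom_numberOfSpecialChars2 word → Spec_numberOfSpecialChars2 word (numberOfSpecialChars2 word)

-- ===== LEMMAS AND PROOFS =====

-- ---- ASCII character facts ----
theorem islower_iff (c : Char) : PySem.Chars.islower c = true ↔ 97 ≤ c.toNat ∧ c.toNat ≤ 122 := by
  simp only [PySem.Chars.islower, Bool.and_eq_true, decide_eq_true_eq, Char.le_def,
    UInt32.le_iff_toNat_le, Char.toNat]
  exact Iff.rfl

theorem isupper_iff (c : Char) : PySem.Chars.isupper c = true ↔ 65 ≤ c.toNat ∧ c.toNat ≤ 90 := by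
  simp only [PySem.Chars.isupper, Bool.and_eq_true, decide_eq_true_eq, Char.le_def,
    UInt32.le_iff_toNat_le, Char.toNat]
  exact Iff.rfl

theorem toNat_ofNat_valid (n : Nat) (h : n < 0xd800) : (Char.ofNat n).toNat = n := by
  have hv : Nat.isValidChar n := Or.inl h
  simp [Char.ofNat, Char.ofNatAux, hv, Char.toNat]

theorem char_eq_of_toNat_eq {c d : Char} (h : c.toNat = d.toNat) : c = d := by
  apply Char.ext
  exact UInt32.toNat_inj.mp h

theorem toNat_upperChar_of_islower {c : Char} (h : PySem.Chars.islower c = true) :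
    (PySem.Chars.upperChar c).toNat = c.toNat - 32 := by
  have := (islower_iff c).mp h
  simp only [PySem.Chars.upperChar, h, if_pos]
  exact toNat_ofNat_valid _ (by omega)

theorem toNat_lowerChar_of_isupper {c : Char} (h : PySem.Chars.isupper c = true) :
    (PySem.Chars.lowerChar c).toNat = c.toNat + 32 := by
  have := (isupper_iff c).mp h
  simp only [PySem.Chars.lowerChar, h, if_pos]
  exact toNat_ofNat_valid _ (by omega)

theorem lowerChar_of_islower {c : Char} (h : PySem.Chars.islower c = true) :
    PySem.Chars.lowerChar c = c := by
  have h1 := (islower_iff c).mp h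
  have h2 : PySem.Chars.isupper c = false := by
    rcases Bool.eq_false_or_eq_true (PySem.Chars.isupper c) with h' | h'
    · have := (isupper_iff c).mp h'; omega
    · exact h'
  simp [PySem.Chars.lowerChar, h2]

theorem isupper_upperChar {c : Char} (h : PySem.Chars.islower c = true) :
    PySem.Chars.isupper (PySem.Chars.upperChar c) = true := by
  have h1 := (islower_iff c).mp h
  rw [isupper_iff, toNat_upperChar_of_islower h]
  omega

theorem lowerChar_upperChar {c : Char} (h : PySem.Chars.islower c = true) :
    PySem.Chars.lowerChar (PySem.Chars.upperChar c) = c := by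
  have h1 := (islower_iff c).mp h
  apply char_eq_of_toNat_eq
  rw [toNat_lowerChar_of_isupper (isupper_upperChar h), toNat_upperChar_of_islower h]
  omega

theorem islower_lowerChar_of_isupper {u : Char} (h : PySem.Chars.isupper u = true) :
    PySem.Chars.islower (PySem.Chars.lowerChar u) = true := by
  have h1 := (isupper_iff u).mp h
  rw [islower_iff, toNat_lowerChar_of_isupper h]
  omega

theorem upperChar_lowerChar {u : Char} (h : PySem.Chars.isupper u = true) :
    PySem.Chars.upperChar (PySem.Chars.lowerChar u) = u := by
  have h1 := (isupper_iff u).mp h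
  apply char_eq_of_toNat_eq
  rw [toNat_upperChar_of_islower (islower_lowerChar_of_isupper h),
    toNat_lowerChar_of_isupper h]
  omega

-- ---- singleton substring facts ----
theorem singleton_infix_iff (c : Char) (l : List Char) : [c] <:+: l ↔ c ∈ l := by
  constructor
  · intro h
    exact h.sublist.mem (List.mem_singleton_self c)
  · intro h
    obtain ⟨s, t, rfl⟩ := List.append_of_mem h
    exact ⟨s, t, by simp⟩

theorem isIn_singleton_iff (c : Char) (l : List Char) :
    PySem.Chars.isIn [c] l = true ↔ c ∈ l := by
  rw [PySem.Chars.isIn_iff_infix, singleton_infix_iff]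

theorem singleton_prefix_drop_iff (c : Char) (l : List Char) (k : Nat) :
    [c] <+: l.drop k ↔ l[k]? = some c := by
  rw [← List.head?_drop]
  constructor
  · rintro ⟨t, ht⟩
    rw [← ht]; rfl
  · intro h
    cases hdrop : l.drop k with
    | nil => rw [hdrop] at h; simp at h
    | cons x xs =>
      rw [hdrop, List.head?_cons, Option.some_inj] at h
      exact ⟨xs, by rw [h]; rfl⟩

-- find on a singleton pattern is the least index of the character
theorem find_singleton_eq {c : Char} {l : List Char} {k : Nat}
    (hk : l[k]? = some c) (hmin : ∀ j, j < k → l[j]? ≠ some c) :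
    PySem.Chars.find l [c] = (k : Int) := by
  have hmem : c ∈ l := List.mem_of_getElem? hk
  have hnn : 0 ≤ PySem.Chars.find l [c] :=
    (PySem.Chars.find_nonneg_iff _ _).mpr ((singleton_infix_iff c l).mpr hmem)
  obtain ⟨hpre, hleast⟩ := PySem.Chars.find_spec hnn
  have h1 : l[(PySem.Chars.find l [c]).toNat]? = some c :=
    (singleton_prefix_drop_iff c l _).mp hpre
  have h2 : (PySem.Chars.find l [c]).toNat = k := by
    rcases Nat.lt_trichotomy (PySem.Chars.find l [c]).toNat k with h | h | h
    · exact absurd h1 (hmin _ h)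
    · exact h
    · exact absurd ((singleton_prefix_drop_iff c l k).mpr hk) (hleast k h)
  omega

-- ---- loop invariant for A's first pass ----
def IsLast (M : List Char) (c : Char) (i : Int) : Prop :=
  ∃ k : Nat, i = (k : Int) ∧ M[k]? = some c ∧ ∀ j, k < j → M[j]? ≠ some c

def IsFirstUp (M : List Char) (c : Char) (f : Int) : Prop :=
  ∃ k : Nat, f = (k : Int) ∧ M[k]? = some (PySem.Chars.upperChar c) ∧
    ∀ j, j < k → M[j]? ≠ some (PySem.Chars.upperChar c)

def InvA (cs M : List Char) (st : PySem.Dict Char Int × PySem.Dict Char Int) : Prop :=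
  st.1.keys.Nodup ∧
  (∀ c i, st.1.get? c = some i →
    (PySem.Chars.islower c && PySem.Chars.isIn [PySem.Chars.upperChar c] cs) = true ∧ IsLast M c i) ∧
  (∀ c, c ∈ M → (PySem.Chars.islower c && PySem.Chars.isIn [PySem.Chars.upperChar c] cs) = true →
    (st.1.get? c).isSome) ∧
  (∀ c f, st.2.get? c = some f →
    PySem.Chars.islower c = true ∧ IsFirstUp M c f) ∧
  (∀ u, u ∈ M → PySem.Chars.isupper u = true →
    PySem.Chars.isIn [PySem.Chars.lowerChar u] cs = true →
    (st.2.get? (PySem.Chars.lowerChar u)).isSome)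

-- lifting the two index specifications over an appended character
theorem isLast_append {M : List Char} {x c : Char} {i : Int} (hne : c ≠ x)
    (h : IsLast M c i) : IsLast (M ++ [x]) c i := by
  obtain ⟨k, rfl, hk, hmax⟩ := h
  have hklt : k < M.length := (List.getElem?_eq_some_iff.mp hk).1
  refine ⟨k, rfl, by rw [List.getElem?_append_left hklt]; exact hk, ?_⟩
  intro j hj
  by_cases hjl : j < M.length
  · rw [List.getElem?_append_left hjl]; exact hmax j hj
  · by_cases hje : j = M.length
    · subst hje
      rw [List.getElem?_concat_length]
      simp [hne.symm]
    · rw [List.getElem?_eq_none_iff.mpr (by simp; omega)]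
      simp

theorem isFirstUp_append {M : List Char} {x c : Char} {f : Int}
    (h : IsFirstUp M c f) : IsFirstUp (M ++ [x]) c f := by
  obtain ⟨k, rfl, hk, hmin⟩ := h
  have hklt : k < M.length := (List.getElem?_eq_some_iff.mp hk).1
  refine ⟨k, rfl, by rw [List.getElem?_append_left hklt]; exact hk, ?_⟩
  intro j hj
  rw [List.getElem?_append_left (by omega)]
  exact hmin j hj

theorem invA_step (cs M : List Char) (x : Char)
    (st : PySem.Dict Char Int × PySem.Dict Char Int) (h : InvA cs M st) :
    InvA cs (M ++ [x]) (stepA cs st ((M.length : Int), x)) := by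
  obtain ⟨hnd, hTLsome, hTLex, hTUsome, hTUex⟩ := h
  have hlen : ∀ j : Nat, M.length < j → (M ++ [x])[j]? = none := by
    intro j hj
    rw [List.getElem?_eq_none_iff.mpr (by simp; omega)]
  -- the two updated dicts, by cases on the two insertion conditions
  by_cases hcL : (PySem.Chars.islower x && PySem.Chars.isIn [PySem.Chars.upperChar x] cs) = true
  all_goals by_cases hcU : (PySem.Chars.isupper x && PySem.Chars.isIn [PySem.Chars.lowerChar x] cs
      && !(st.2.contains (PySem.Chars.lowerChar x))) = true
  all_goals
    refine ⟨?_, ?_, ?_, ?_, ?_⟩ <;>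
      simp only [stepA, hcL, hcU, if_true, if_false, Bool.false_eq_true]
  -- ===== case hcL true, hcU true =====
  case pos.refine_1 =>
    exact PySem.Dict.nodup_keys_insert _ _ _ hnd
  case pos.refine_2 =>
    have hxl : PySem.Chars.islower x = true := (Bool.and_eq_true_iff.mp hcL).1
    rw [lowerChar_of_islower hxl]
    intro c i hget
    by_cases hc : c = x
    · subst hc
      rw [PySem.Dict.get?_insert_self] at hget
      obtain rfl : ((M.length : Int)) = i := Option.some_inj.mp hget
      refine ⟨hcL, M.length, rfl, List.getElem?_concat_length, ?_⟩
      intro j hj hj'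
      rw [hlen j hj] at hj'
      simp at hj'
    · rw [PySem.Dict.get?_insert_of_ne _ _ hc] at hget
      obtain ⟨hP, hL⟩ := hTLsome c i hget
      exact ⟨hP, isLast_append hc hL⟩
  case pos.refine_3 =>
    have hxl : PySem.Chars.islower x = true := (Bool.and_eq_true_iff.mp hcL).1
    rw [lowerChar_of_islower hxl]
    intro c hc hP
    by_cases hcx : c = x
    · subst hcx
      rw [PySem.Dict.get?_insert_self]
      rfl
    · rw [PySem.Dict.get?_insert_of_ne _ _ hcx]
      rcases List.mem_append.mp hc with hc' | hc'
      · exact hTLex c hc' hP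
      · exact absurd (List.mem_singleton.mp hc') hcx
  case pos.refine_4 =>
    obtain ⟨hab, hnc⟩ := Bool.and_eq_true_iff.mp hcU
    obtain ⟨hxu, hxin⟩ := Bool.and_eq_true_iff.mp hab
    intro c f hget
    by_cases hc : c = PySem.Chars.lowerChar x
    · subst hc
      rw [PySem.Dict.get?_insert_self] at hget
      obtain rfl : ((M.length : Int)) = f := Option.some_inj.mp hget
      refine ⟨islower_lowerChar_of_isupper hxu, M.length, rfl, ?_, ?_⟩
      · rw [upperChar_lowerChar hxu]
        exact List.getElem?_concat_length
      · intro j hj hj'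
        rw [upperChar_lowerChar hxu, List.getElem?_append_left hj] at hj'
        have hxM : x ∈ M := List.mem_of_getElem? hj'
        have := hTUex x hxM hxu hxin
        rw [PySem.Dict.contains_eq_isSome_get?, this] at hnc
        simp at hnc
    · rw [PySem.Dict.get?_insert_of_ne _ _ hc] at hget
      obtain ⟨hl, hF⟩ := hTUsome c f hget
      exact ⟨hl, isFirstUp_append hF⟩
  case pos.refine_5 =>
    intro u hu huu huin
    by_cases hc : PySem.Chars.lowerChar u = PySem.Chars.lowerChar x
    · rw [hc, PySem.Dict.get?_insert_self]
      rfl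
    · rw [PySem.Dict.get?_insert_of_ne _ _ hc]
      rcases List.mem_append.mp hu with hu' | hu'
      · exact hTUex u hu' huu huin
      · obtain rfl := List.mem_singleton.mp hu'
        exact absurd rfl hc
  -- ===== case hcL true, hcU false =====
  case neg.refine_1 =>
    exact PySem.Dict.nodup_keys_insert _ _ _ hnd
  case neg.refine_2 =>
    have hxl : PySem.Chars.islower x = true := (Bool.and_eq_true_iff.mp hcL).1
    rw [lowerChar_of_islower hxl]
    intro c i hget
    by_cases hc : c = x
    · subst hc
      rw [PySem.Dict.get?_insert_self] at hget
      obtain rfl : ((M.length : Int)) = i := Option.some_inj.mp hget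
      refine ⟨hcL, M.length, rfl, List.getElem?_concat_length, ?_⟩
      intro j hj hj'
      rw [hlen j hj] at hj'
      simp at hj'
    · rw [PySem.Dict.get?_insert_of_ne _ _ hc] at hget
      obtain ⟨hP, hL⟩ := hTLsome c i hget
      exact ⟨hP, isLast_append hc hL⟩
  case neg.refine_3 =>
    have hxl : PySem.Chars.islower x = true := (Bool.and_eq_true_iff.mp hcL).1
    rw [lowerChar_of_islower hxl]
    intro c hc hP
    by_cases hcx : c = x
    · subst hcx
      rw [PySem.Dict.get?_insert_self]
      rfl
    · rw [PySem.Dict.get?_insert_of_ne _ _ hcx]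
      rcases List.mem_append.mp hc with hc' | hc'
      · exact hTLex c hc' hP
      · exact absurd (List.mem_singleton.mp hc') hcx
  case neg.refine_4 =>
    intro c f hget
    obtain ⟨hl, hF⟩ := hTUsome c f hget
    exact ⟨hl, isFirstUp_append hF⟩
  case neg.refine_5 =>
    intro u hu huu huin
    rcases List.mem_append.mp hu with hu' | hu'
    · exact hTUex u hu' huu huin
    · obtain rfl := List.mem_singleton.mp hu'
      rcases Bool.eq_false_or_eq_true (st.2.contains (PySem.Chars.lowerChar u)) with hcc | hcc
      · rw [PySem.Dict.contains_eq_isSome_get?] at hcc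
        exact hcc
      · exfalso
        apply hcU
        rw [huu, huin, hcc]
        rfl
  -- ===== case hcL false =====
  all_goals first
  | exact hnd
  | (intro c i hget
     obtain ⟨hP, hL⟩ := hTLsome c i hget
     refine ⟨hP, isLast_append (fun hcx => ?_) hL⟩
     rw [hcx] at hP
     rw [hP] at hcL
     exact hcL rfl)
  | (intro c hc hP
     rcases List.mem_append.mp hc with hc' | hc'
     · exact hTLex c hc' hP
     · obtain rfl := List.mem_singleton.mp hc'
       exact absurd hP hcL)
  | skip
  -- remaining: tu-parts of the hcL-false cases (same arguments as above)
  case pos.refine_4 =>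
    obtain ⟨hab, hnc⟩ := Bool.and_eq_true_iff.mp hcU
    obtain ⟨hxu, hxin⟩ := Bool.and_eq_true_iff.mp hab
    intro c f hget
    by_cases hc : c = PySem.Chars.lowerChar x
    · subst hc
      rw [PySem.Dict.get?_insert_self] at hget
      obtain rfl : ((M.length : Int)) = f := Option.some_inj.mp hget
      refine ⟨islower_lowerChar_of_isupper hxu, M.length, rfl, ?_, ?_⟩
      · rw [upperChar_lowerChar hxu]
        exact List.getElem?_concat_length
      · intro j hj hj'
        rw [upperChar_lowerChar hxu, List.getElem?_append_left hj] at hj'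
        have hxM : x ∈ M := List.mem_of_getElem? hj'
        have := hTUex x hxM hxu hxin
        rw [PySem.Dict.contains_eq_isSome_get?, this] at hnc
        simp at hnc
    · rw [PySem.Dict.get?_insert_of_ne _ _ hc] at hget
      obtain ⟨hl, hF⟩ := hTUsome c f hget
      exact ⟨hl, isFirstUp_append hF⟩
  case pos.refine_5 =>
    intro u hu huu huin
    by_cases hc : PySem.Chars.lowerChar u = PySem.Chars.lowerChar x
    · rw [hc, PySem.Dict.get?_insert_self]
      rfl
    · rw [PySem.Dict.get?_insert_of_ne _ _ hc]
      rcases List.mem_append.mp hu with hu' | hu'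
      · exact hTUex u hu' huu huin
      · obtain rfl := List.mem_singleton.mp hu'
        exact absurd rfl hc
  case neg.refine_4 =>
    intro c f hget
    obtain ⟨hl, hF⟩ := hTUsome c f hget
    exact ⟨hl, isFirstUp_append hF⟩
  case neg.refine_5 =>
    intro u hu huu huin
    rcases List.mem_append.mp hu with hu' | hu'
    · exact hTUex u hu' huu huin
    · obtain rfl := List.mem_singleton.mp hu'
      rcases Bool.eq_false_or_eq_true (st.2.contains (PySem.Chars.lowerChar u)) with hcc | hcc
      · rw [PySem.Dict.contains_eq_isSome_get?] at hcc
        exact hcc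
      · exfalso
        apply hcU
        rw [huu, huin, hcc]
        rfl

theorem invA_holds (cs M : List Char) :
    InvA cs M ((PySem.List.enumerate M 0).foldl (stepA cs) (PySem.Dict.empty, PySem.Dict.empty)) := by
  induction M using List.reverseRecOn with
  | nil =>
    refine ⟨by simp [PySem.Dict.keys_empty], ?_, ?_, ?_, ?_⟩ <;>
      simp [PySem.Dict.get?_empty, PySem.List.enumerate_nil]
  | append_singleton M x ih =>
    rw [PySem.List.enumerate_append, List.foldl_append, PySem.List.enumerate_cons,
      PySem.List.enumerate_nil]
    simp only [List.foldl_cons, List.foldl_nil]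
    have := invA_step cs M x _ ih
    simpa using this

-- ---- final assembly ----
theorem main_eq (word : String) : numberOfSpecialChars2 word = numberOfSpecialChars2_alt word := by
  unfold numberOfSpecialChars2 numberOfSpecialChars2_alt
  simp only []
  obtain ⟨hnd, hTLsome, hTLex, hTUsome, hTUex⟩ := invA_holds word.toList word.toList
  rw [PySem.List.foldl_ite_add_one, PySem.List.foldl_if_add_one]
  set cs := word.toList with hcs
  set st := (PySem.List.enumerate cs 0).foldl (stepA cs) (PySem.Dict.empty, PySem.Dict.empty)
    with hst
  congr 1
  -- characterize the per-key comparison as B's test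
  have hkey : ∀ c ∈ st.1.keys,
      (decide (st.1.getD c 0 < st.2.getD c 0)) = true ↔ testB cs c = true := by
    intro c hc
    have hcontains : st.1.contains c = true := (PySem.Dict.contains_iff_mem_keys _ _).mpr hc
    rw [PySem.Dict.contains_eq_isSome_get?] at hcontains
    obtain ⟨i, hi⟩ := Option.isSome_iff_exists.mp hcontains
    obtain ⟨hP, ki, rfl, hki, hmax⟩ := hTLsome c i hi
    obtain ⟨hlc, hin⟩ := Bool.and_eq_true_iff.mp hP
    have hcmem : c ∈ cs := List.mem_of_getElem? hki
    have hucmem : PySem.Chars.upperChar c ∈ cs := (isIn_singleton_iff _ _).mp hin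
    have hus := hTUex (PySem.Chars.upperChar c) hucmem (isupper_upperChar hlc)
      (by rw [lowerChar_upperChar hlc]; exact (isIn_singleton_iff _ _).mpr hcmem)
    rw [lowerChar_upperChar hlc] at hus
    obtain ⟨fv, hf⟩ := Option.isSome_iff_exists.mp hus
    obtain ⟨-, kf, rfl, hkf, hmin⟩ := hTUsome c fv hf
    rw [PySem.Dict.getD_of_get?_eq_some _ _ hi, PySem.Dict.getD_of_get?_eq_some _ _ hf]
    have hfind : PySem.Chars.find cs [PySem.Chars.upperChar c] = (kf : Int) :=
      find_singleton_eq hkf hmin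
    have hslice : PySem.List.slice cs (some (PySem.Chars.find cs [PySem.Chars.upperChar c])) none
        = cs.drop kf := by
      rw [hfind, PySem.List.slice_from cs (by positivity), Int.toNat_natCast]
    have hdropmem : c ∈ cs.drop kf ↔ ¬ (ki < kf) := by
      constructor
      · intro hmem hlt
        obtain ⟨j, hj, hj'⟩ := List.getElem_of_mem hmem
        rw [List.getElem_drop] at hj'
        have hdl : (cs.drop kf).length = cs.length - kf := List.length_drop
        have : cs[kf + j]? = some c := by
          rw [List.getElem?_eq_some_iff]
          exact ⟨by omega, hj'⟩
        exact hmax (kf + j) (by omega) this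
      · intro hge
        have : cs[kf + (ki - kf)]? = some c := by
          rw [show kf + (ki - kf) = ki by omega]
          exact hki
        have := List.mem_of_getElem? (l := cs.drop kf) (i := ki - kf)
          (by rw [List.getElem?_drop]; exact this)
        exact this
    simp only [testB, hlc, hin, Bool.true_and, hslice]
    have hIn : PySem.Chars.isIn [c] (cs.drop kf) = true ↔ c ∈ cs.drop kf :=
      isIn_singleton_iff _ _
    constructor
    · intro h
      have hlt : ((ki : Int)) < ((kf : Int)) := of_decide_eq_true h
      have hnm : ¬ c ∈ cs.drop kf := fun hmem => (hdropmem.mp hmem) (by exact_mod_cast hlt)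
      rcases Bool.eq_false_or_eq_true (PySem.Chars.isIn [c] (cs.drop kf)) with hb | hb
      · exact absurd (hIn.mp hb) hnm
      · rw [hb]; rfl
    · intro h
      rw [Bool.not_eq_true'] at h
      have hnm : ¬ c ∈ cs.drop kf := fun hmem => absurd (hIn.mpr hmem) (by simp [h])
      have hlt : ki < kf := by
        by_contra hge
        exact hnm (hdropmem.mpr hge)
      exact decide_eq_true (by exact_mod_cast hlt)
  rw [List.countP_congr hkey]
  -- same distinct keys, counted in a different order
  rw [List.countP_eq_length_filter, List.countP_eq_length_filter]
  congr 1
  apply List.Perm.length_eq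
  rw [List.perm_ext_iff_of_nodup (hnd.filter _) ((PySem.Set.nodup_ofList cs).filter _)]
  intro a
  simp only [List.mem_filter, PySem.Set.mem_ofList]
  constructor
  · rintro ⟨hak, hat⟩
    refine ⟨?_, hat⟩
    have hcontains : st.1.contains a = true := (PySem.Dict.contains_iff_mem_keys _ _).mpr hak
    rw [PySem.Dict.contains_eq_isSome_get?] at hcontains
    obtain ⟨i, hi⟩ := Option.isSome_iff_exists.mp hcontains
    obtain ⟨-, ki, -, hki, -⟩ := hTLsome a i hi
    exact List.mem_of_getElem? hki
  · rintro ⟨ham, hat⟩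
    refine ⟨?_, hat⟩
    have hP : (PySem.Chars.islower a && PySem.Chars.isIn [PySem.Chars.upperChar a] cs) = true := by
      have := Bool.and_eq_true_iff.mp (by
        have : testB cs a = true := hat
        unfold testB at this
        exact (Bool.and_eq_true_iff.mp this).1)
      exact Bool.and_eq_true_iff.mpr this
    have := hTLex a ham hP
    rw [← PySem.Dict.contains_eq_isSome_get?] at this
    exact (PySem.Dict.contains_iff_mem_keys _ _).mp this

-- ===== VERDICT (by name: the statement is the Claim_ definition above) =====
theorem numberOfSpecialChars2_spec : Claim_equal_numberOfSpecialChars2 := by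
  intro word _
  unfold Spec_numberOfSpecialChars2
  exact main_eq word
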